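-- pv_equiv track=rewrite | github.com/chen700564/supercd | models/sdnet.py | text2entity
-- ===== SOURCE A (Python) =====
-- def text2entity(text):
--     entitys = []
--     indexs = [i for i in range(len(text)) if text.startswith('.', i)]
--     start = 0
--     for i in indexs:
--         subtext = text[start:i].split(' ')
--         if 'is' in subtext and subtext[-1] != 'is':
--             indexs2 =  [i for i,a in enumerate(subtext) if a=='is']
--             index = indexs2[-1]
--             entity = [' '.join(subtext[:index]).strip(),' '.join(subtext[index+1:]).strip()]
--             entitys.append(entity)
--             start = i + 1
--     return entitys
-- ===== SOURCE B (Python) =====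
-- def text2entity(text):
--     # Single left-to-right pass: maintain completed tokens, the current token
--     # buffer, and the index of the last completed 'is' token; emit on '.'.
--     entitys = []
--     tokens = []
--     buf = []
--     last_is = None
--     for c in text:
--         if c == '.':
--             if last_is is not None and buf != ['i', 's']:
--                 left = ' '.join(tokens[:last_is]).strip()
--                 right = ' '.join(tokens[last_is + 1:] + [''.join(buf)]).strip()
--                 entitys.append([left, right])
--                 tokens = []
--                 buf = []
--                 last_is = None
--             else:
--                 buf.append('.')
--         elif c == ' ':
--             tokens.append(''.join(buf))
--             if buf == ['i', 's']:
--                 last_is = len(tokens) - 1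
--             buf = []
--         else:
--             buf.append(c)
--     return entitys
-- ===== Notes on version B (the rewrite author's own statement) =====
-- stated objective: faster
-- what changed: A collects all '.' positions and, for each, re-slices and re-splits the whole accumulated segment and rescans it for 'is' tokens; B makes one left-to-right pass over the characters, maintaining the completed tokens, the current token buffer and the index of the last completed 'is' token, emitting an entity pair directly at each matching '.'.
import Mathlib
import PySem

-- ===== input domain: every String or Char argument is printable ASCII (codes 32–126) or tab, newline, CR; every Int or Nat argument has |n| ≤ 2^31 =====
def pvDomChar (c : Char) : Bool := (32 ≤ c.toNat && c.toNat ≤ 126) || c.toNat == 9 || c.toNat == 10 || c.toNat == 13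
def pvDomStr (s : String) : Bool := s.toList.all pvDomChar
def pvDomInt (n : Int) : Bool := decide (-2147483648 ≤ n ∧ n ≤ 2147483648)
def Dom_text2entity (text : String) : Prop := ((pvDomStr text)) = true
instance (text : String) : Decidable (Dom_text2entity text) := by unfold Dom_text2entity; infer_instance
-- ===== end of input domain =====

-- B replaces A's scan-all-dot-positions-then-reslice-and-resplit scheme by a single
-- left-to-right pass that maintains the completed tokens, the current token buffer and
-- the index of the last completed 'is' token (objective: faster, one pass).

-- ===== PORT A =====
-- A-side helpers: the loop-body condition, entity construction and loop body, named.
-- subtext (a result of split(' ')) is never empty, so the pyGetD defaults are never used.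
def pvSubCond (subtext : List (List Char)) : Bool :=
  subtext.contains ['i','s'] && !(PySem.List.pyGetD subtext (-1) [] == ['i','s'])

def pvEntity (subtext : List (List Char)) : List String :=
  let indexs2 := ((PySem.List.enumerate subtext 0).filter (fun p => p.2 == ['i','s'])).map (fun p => p.1)
  let index := PySem.List.pyGetD indexs2 (-1) 0
  [String.ofList (PySem.Chars.strip (PySem.Chars.join [' '] (PySem.List.slice subtext none (some index)))),
   String.ofList (PySem.Chars.strip (PySem.Chars.join [' '] (PySem.List.slice subtext (some (index + 1)) none)))]

def pvStepA (cs : List Char) (st : Int × List (List String)) (i : Int) : Int × List (List String) :=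
  let subtext := PySem.Chars.splitOn (PySem.Chars.slice cs (some st.1) (some i)) [' ']
  if pvSubCond subtext then (i + 1, st.2 ++ [pvEntity subtext]) else st

-- text.startswith('.', i) is ported as startswith of the slice text[i:] (exact).
def text2entity (text : String) : List (List String) :=
  let cs := text.toList
  let indexs := (PySem.List.pyRange 0 (PySem.Chars.len cs) 1).filter
      (fun i => PySem.Chars.startswith (PySem.Chars.slice cs (some i) none) ['.'])
  (indexs.foldl (pvStepA cs) ((0 : Int), ([] : List (List String)))).2

-- ===== PORT B =====
-- B-side helper: the loop state of Source B (entitys, tokens, buf, last_is) and its step.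
structure PvBState where
  entitys : List (List String)
  tokens : List (List Char)
  buf : List Char
  lastIs : Option Int

def pvStepB (st : PvBState) (c : Char) : PvBState :=
  if c = '.' then
    match st.lastIs with
    | some v =>
      if st.buf == ['i','s'] then { st with buf := st.buf ++ ['.'] }
      else
        let left := String.ofList (PySem.Chars.strip (PySem.Chars.join [' '] (PySem.List.slice st.tokens none (some v))))
        let right := String.ofList (PySem.Chars.strip (PySem.Chars.join [' '] (PySem.List.slice st.tokens (some (v + 1)) none ++ [st.buf])))
        { entitys := st.entitys ++ [[left, right]], tokens := [], buf := [], lastIs := none }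
    | none => { st with buf := st.buf ++ ['.'] }
  else if c = ' ' then
    let tokens' := st.tokens ++ [st.buf]
    { entitys := st.entitys, tokens := tokens', buf := [],
      lastIs := if st.buf == ['i','s'] then some ((tokens'.length : Int) - 1) else st.lastIs }
  else
    { st with buf := st.buf ++ [c] }

def text2entity_alt (text : String) : List (List String) :=
  (text.toList.foldl pvStepB ⟨[], [], [], none⟩).entitys

-- ===== PRECONDITION & SPEC =====
def Spec_text2entity (text : String) (out : List (List String)) : Prop := out = text2entity_alt text
instance (text : String) (out : List (List String)) : Decidable (Spec_text2entity text out) := by unfold Spec_text2entity; infer_instance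

-- ===== CLAIM (what is proved, stated in full; the proofs are below) =====
def Claim_equal_text2entity : Prop := ∀ (text : String), Dom_text2entity text → Spec_text2entity text (text2entity text)

-- ===== LEMMAS AND PROOFS =====
def pvSplit (cur : List Char) : List Char → List (List Char)
  | [] => [cur]
  | c :: rest => if c = ' ' then cur :: pvSplit [] rest else pvSplit (cur ++ [c]) rest

lemma pvSplit_go (l : List Char) : ∀ (fuel : Nat) (cur : List Char) (acc : List (List Char)),
    l.length < fuel →
    PySem.Chars.splitOn.go [' '] fuel l cur acc = acc.reverse ++ pvSplit cur.reverse l := by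
  induction l with
  | nil =>
    intro fuel cur acc h
    cases fuel with
    | zero => omega
    | succ f =>
      rw [PySem.Chars.splitOn.go]
      simp [pvSplit]
      omega
  | cons c rest ih =>
    intro fuel cur acc h
    cases fuel with
    | zero => simp at h
    | succ f =>
      rw [PySem.Chars.splitOn.go]
      simp only [List.length_cons, Nat.succ_lt_succ_iff] at h
      by_cases hc : c = ' '
      · subst hc
        rw [show ([' '].isPrefixOf (' ' :: rest)) = true by simp [List.isPrefixOf]]
        simp only [if_pos, List.length_cons, List.length_nil, List.drop_succ_cons, List.drop_zero]
        rw [ih f [] (cur.reverse :: acc) (by omega)]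
        simp [pvSplit]
      · rw [show ([' '].isPrefixOf (c :: rest)) = false by
          simp [List.isPrefixOf]; exact fun h => hc h.symm]
        simp only [Bool.false_eq_true, if_false]
        rw [ih f (c :: cur) acc (by omega)]
        simp [pvSplit, hc]

lemma splitOn_eq_pvSplit (s : List Char) : PySem.Chars.splitOn s [' '] = pvSplit [] s := by
  rw [PySem.Chars.splitOn]
  rw [pvSplit_go s (s.length+1) [] [] (by omega)]
  simp

lemma pvSplit_ne_nil (cur : List Char) (s : List Char) : pvSplit cur s ≠ [] := by
  induction s generalizing cur with
  | nil => simp [pvSplit]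
  | cons c rest ih => by_cases hc : c = ' ' <;> simp [pvSplit, hc, ih]

lemma pvSplit_snoc_space (s : List Char) : ∀ (cur : List Char),
    pvSplit cur (s ++ [' ']) = pvSplit cur s ++ [[]] := by
  induction s with
  | nil => intro cur; simp [pvSplit]
  | cons c rest ih =>
    intro cur
    by_cases hc : c = ' ' <;> simp [pvSplit, hc, ih]

lemma pvSplit_snoc (s : List Char) : ∀ (cur : List Char) (c : Char), c ≠ ' ' →
    ∀ (ts : List (List Char)) (b : List Char), pvSplit cur s = ts ++ [b] →
    pvSplit cur (s ++ [c]) = ts ++ [b ++ [c]] := by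
  induction s with
  | nil =>
    intro cur c hc ts b hsp
    simp only [pvSplit] at hsp
    cases ts with
    | nil =>
      simp only [List.nil_append, List.cons.injEq] at hsp
      simp [pvSplit, hc, hsp.1]
    | cons t ts' =>
      exfalso
      simp only [List.cons_append, List.cons.injEq] at hsp
      exact List.append_ne_nil_of_right_ne_nil _ (by simp) hsp.2.symm
  | cons a rest ih =>
    intro cur c hc ts b hsp
    by_cases ha : a = ' '
    · subst ha
      simp only [pvSplit, if_true] at hsp
      rw [List.cons_append, show pvSplit cur (' ' :: (rest ++ [c])) = cur :: pvSplit [] (rest ++ [c]) from by simp [pvSplit]]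
      cases ts with
      | nil =>
        exfalso
        have := pvSplit_ne_nil ([] : List Char) rest
        simp at hsp
        exact this hsp.2
      | cons t ts' =>
        simp only [List.cons_append, List.cons.injEq] at hsp
        simp only [List.cons_append]
        rw [ih [] c hc ts' b hsp.2]
        simp [hsp.1]
    · simp only [pvSplit, if_neg ha] at hsp
      rw [List.cons_append, show pvSplit cur (a :: (rest ++ [c])) = pvSplit (cur ++ [a]) (rest ++ [c]) from by simp [pvSplit, ha]]
      exact ih (cur ++ [a]) c hc ts b hsp

def pvAllIs : List (List Char) → List Nat
  | [] => []
  | t :: ts => (if t = ['i','s'] then [0] else []) ++ (pvAllIs ts).map (· + 1)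

lemma pvAllIs_snoc (ts : List (List Char)) (b : List Char) :
    pvAllIs (ts ++ [b]) = pvAllIs ts ++ (if b = ['i','s'] then [ts.length] else []) := by
  induction ts with
  | nil => by_cases hb : b = ['i','s'] <;> simp [pvAllIs, hb]
  | cons t ts ih =>
    simp only [List.cons_append, pvAllIs, ih, List.map_append, List.append_assoc, List.length_cons]
    by_cases hb : b = ['i','s'] <;> simp [hb]

lemma pvAllIs_eq_nil_iff (ts : List (List Char)) : pvAllIs ts = [] ↔ ['i','s'] ∉ ts := by
  induction ts with
  | nil => simp [pvAllIs]
  | cons t ts ih =>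
    by_cases ht : t = ['i','s']
    · simp [pvAllIs, ht]
    · simp [pvAllIs, ht, ih, Ne.symm ht]

lemma pvAllIs_lt (ts : List (List Char)) : ∀ k ∈ pvAllIs ts, k < ts.length := by
  induction ts with
  | nil => simp [pvAllIs]
  | cons t ts ih =>
    intro k hk
    simp only [pvAllIs, List.mem_append, List.mem_map] at hk
    rcases hk with hk | ⟨j, hj, rfl⟩
    · have hk0 : k = 0 := by
        by_cases ht : t = ['i','s']
        · rw [if_pos ht] at hk; simpa using hk
        · rw [if_neg ht] at hk; simp at hk
      simp [hk0]
    · have := ih j hj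
      simp only [List.length_cons]
      omega

lemma pvEnumFilter (ts : List (List Char)) : ∀ (s : Int),
    ((PySem.List.enumerate ts s).filter (fun p => p.2 == (['i','s'] : List Char))).map (fun p => p.1)
      = List.map (fun k : Nat => s + (k : Int)) (pvAllIs ts) := by
  induction ts with
  | nil => intro s; simp [PySem.List.enumerate_nil, pvAllIs]
  | cons t ts ih =>
    intro s
    rw [PySem.List.enumerate_cons]
    have htail : ((PySem.List.enumerate ts (s+1)).filter (fun p => p.2 == (['i','s'] : List Char))).map (fun p => p.1)
        = List.map (fun k : Nat => s + (k : Int)) ((pvAllIs ts).map (· + 1)) := by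
      rw [ih (s+1), List.map_map]
      apply List.map_congr_left
      intro k _
      simp only [Function.comp]
      push_cast
      ring
    by_cases ht : t = ['i','s']
    · rw [List.filter_cons_of_pos (by simp [ht])]
      rw [List.map_cons, htail]
      simp only [pvAllIs, if_pos ht]
      simp
    · rw [List.filter_cons_of_neg (by simp [ht])]
      rw [htail]
      simp [pvAllIs, if_neg ht]

def pvLastIsOf (ts : List (List Char)) : Option Int := ((pvAllIs ts).getLast?).map (fun k => (k : Int))

lemma pvGetD_last {α : Type} (xs : List α) (b d : α) : PySem.List.pyGetD (xs ++ [b]) (-1) d = b := by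
  simp [PySem.List.pyGetD, PySem.List.pyGet?, PySem.List.pyIdx?]

lemma pvCond_eq (tokens : List (List Char)) (buf : List Char) :
    pvSubCond (tokens ++ [buf]) = ((pvLastIsOf tokens).isSome && !(buf == ['i','s'])) := by
  unfold pvSubCond pvLastIsOf
  rw [pvGetD_last]
  by_cases hb : buf = ['i','s']
  · simp [hb]
  · by_cases hm : (['i','s'] : List Char) ∈ tokens
    · have hne : pvAllIs tokens ≠ [] := fun h => (pvAllIs_eq_nil_iff tokens).mp h hm
      obtain ⟨k, hk⟩ := Option.isSome_iff_exists.mp (List.getLast?_isSome.mpr hne)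
      simp [hm, Ne.symm hb, hk]
    · simp [hm, Ne.symm hb, (pvAllIs_eq_nil_iff tokens).mpr hm]

lemma pvEntity_eq (tokens : List (List Char)) (buf : List Char) (k : Nat)
    (hb : buf ≠ ['i','s']) (hk : (pvAllIs tokens).getLast? = some k) :
    pvEntity (tokens ++ [buf]) =
      [String.ofList (PySem.Chars.strip (PySem.Chars.join [' '] (PySem.List.slice tokens none (some (k : Int))))),
       String.ofList (PySem.Chars.strip (PySem.Chars.join [' '] (PySem.List.slice tokens (some ((k : Int) + 1)) none ++ [buf])))] := by
  have hall : pvAllIs (tokens ++ [buf]) = pvAllIs tokens := by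
    rw [pvAllIs_snoc, if_neg hb, List.append_nil]
  have hkmem : k ∈ pvAllIs tokens := List.mem_of_getLast? hk
  have hklt : k < tokens.length := pvAllIs_lt tokens k hkmem
  obtain ⟨init, hinit⟩ := (List.getLast?_eq_some_iff).mp hk
  have hidx : PySem.List.pyGetD (List.map (fun k : Nat => (0:Int) + (k : Int)) (init ++ [k])) (-1) 0 = (k : Int) := by
    rw [List.map_append]
    simp only [List.map_cons, List.map_nil]
    rw [pvGetD_last]
    simp
  have hs1 : PySem.List.slice (tokens ++ [buf]) none (some (k : Int)) = PySem.List.slice tokens none (some (k : Int)) := by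
    rw [PySem.List.slice_to_natCast, PySem.List.slice_to_natCast]
    exact List.take_append_of_le_length (by omega)
  have hs2 : PySem.List.slice (tokens ++ [buf]) (some ((k : Int) + 1)) none
      = PySem.List.slice tokens (some ((k : Int) + 1)) none ++ [buf] := by
    have hcast : ((k : Int) + 1) = ((k + 1 : Nat) : Int) := by push_cast; ring
    rw [hcast, PySem.List.slice_from_natCast, PySem.List.slice_from_natCast]
    exact List.drop_append_of_le_length (by omega)
  unfold pvEntity
  simp only [pvEnumFilter, hall, hinit, hidx, hs1, hs2]

def pvRunA (pending : List Char) (rest : List Char) (acc : List (List String)) : List (List String) :=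
  match rest with
  | [] => acc
  | c :: t =>
    if c = '.' then
      let subtext := pvSplit [] pending
      if pvSubCond subtext then pvRunA [] t (acc ++ [pvEntity subtext])
      else pvRunA (pending ++ ['.']) t acc
    else pvRunA (pending ++ [c]) t acc

lemma pvAfold (full : List Char) : ∀ (n p st : Nat) (acc : List (List String)),
    st ≤ p → p + n = full.length →
    (((PySem.List.pyRange (p : Int) ((full.length : Nat) : Int) 1).filter
        (fun i => PySem.Chars.startswith (PySem.Chars.slice full (some i) none) ['.'])).foldl
      (pvStepA full) (((st : Nat) : Int), acc)).2
      = pvRunA ((full.drop st).take (p - st)) (full.drop p) acc := by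
  intro n
  induction n with
  | zero =>
    intro p st acc hle hlen
    rw [PySem.List.pyRange_one_eq_nil (by exact_mod_cast le_of_eq (by omega : full.length = p))]
    rw [show full.drop p = [] from List.drop_eq_nil_of_le (by omega)]
    simp [pvRunA]
  | succ n ih =>
    intro p st acc hle hlen
    have hplt : p < full.length := by omega
    obtain ⟨c, t, hct⟩ : ∃ c t, full.drop p = c :: t := by
      cases hd : full.drop p with
      | nil => exfalso; have := List.length_drop (l := full) (i := p); rw [hd] at this; simp at this; omega
      | cons c t => exact ⟨c, t, rfl⟩
    have hdrop1 : full.drop (p + 1) = t := by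
      rw [← List.tail_drop, hct]; rfl
    have hgetp : full[p]? = some c := by
      have h0 : (full.drop p)[0]? = some c := by rw [hct]; rfl
      rw [List.getElem?_drop] at h0
      simpa using h0
    have htake : ∀ q : Nat, q ≤ p → (full.drop q).take (p + 1 - q) = (full.drop q).take (p - q) ++ [c] := by
      intro q hq
      rw [show p + 1 - q = (p - q) + 1 by omega, List.take_add_one, List.getElem?_drop,
        show q + (p - q) = p by omega, hgetp]
      rfl
    have hpred : PySem.Chars.startswith (PySem.Chars.slice full (some (p:Int)) none) ['.'] = decide (c = '.') := by
      rw [PySem.Chars.slice_eq_listSlice, PySem.List.slice_from_natCast, hct]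
      by_cases hc : c = '.'
      · simp [hc, PySem.Chars.startswith_iff, List.cons_prefix_cons]
      · have hcc : ¬ (('.' : Char) = c) := fun h => hc h.symm
        rw [show decide (c = '.') = false by simp [hc], Bool.eq_false_iff, Ne,
          PySem.Chars.startswith_iff, List.cons_prefix_cons]
        simp [hcc]
    rw [PySem.List.pyRange_one_cons (by exact_mod_cast hplt)]
    rw [List.filter_cons]
    rw [hpred]
    rw [hct]
    by_cases hc : c = '.'
    · subst hc
      simp only [decide_true, if_pos]
      rw [List.foldl_cons]
      have hsub : PySem.Chars.splitOn (PySem.Chars.slice full (some ((st : Nat) : Int)) (some ((p : Nat) : Int))) [' ']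
          = pvSplit [] ((full.drop st).take (p - st)) := by
        rw [PySem.Chars.slice_eq_listSlice, PySem.List.slice_natCast, splitOn_eq_pvSplit]
      rw [show pvRunA ((full.drop st).take (p - st)) ('.' :: t) acc
            = if pvSubCond (pvSplit [] ((full.drop st).take (p - st)))
              then pvRunA [] t (acc ++ [pvEntity (pvSplit [] ((full.drop st).take (p - st)))])
              else pvRunA ((full.drop st).take (p - st) ++ ['.']) t acc from by simp [pvRunA]]
      by_cases hcond : pvSubCond (pvSplit [] ((full.drop st).take (p - st)))
      · rw [show pvStepA full (((st : Nat) : Int), acc) ((p : Nat) : Int)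
              = (((p : Nat) : Int) + 1, acc ++ [pvEntity (pvSplit [] ((full.drop st).take (p - st)))]) from by
            unfold pvStepA; rw [hsub, if_pos hcond]]
        rw [if_pos hcond]
        have hcast : ((p : Nat) : Int) + 1 = (((p + 1 : Nat)) : Int) := by push_cast; ring
        rw [hcast]
        have := ih (p + 1) (p + 1) (acc ++ [pvEntity (pvSplit [] ((full.drop st).take (p - st)))]) (by omega) (by omega)
        rw [this, hdrop1]
        simp
      · rw [show pvStepA full (((st : Nat) : Int), acc) ((p : Nat) : Int) = (((st : Nat) : Int), acc) from by
            unfold pvStepA; rw [hsub, if_neg hcond]]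
        rw [if_neg hcond]
        have := ih (p + 1) st acc (by omega) (by omega)
        push_cast at this
        rw [this, hdrop1, htake st hle]
    · simp only [hc, decide_false, Bool.false_eq_true, if_false]
      have := ih (p + 1) st acc (by omega) (by omega)
      push_cast at this
      rw [this, hdrop1, htake st hle]
      rw [show pvRunA ((full.drop st).take (p - st)) (c :: t) acc
            = pvRunA ((full.drop st).take (p - st) ++ [c]) t acc from by simp [pvRunA, hc]]

lemma pvA_eq (text : String) : text2entity text = pvRunA [] text.toList [] := by
  unfold text2entity
  have h := pvAfold text.toList text.toList.length 0 0 [] (le_refl 0) (by omega)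
  simp only [Nat.cast_zero, Nat.sub_zero, List.drop_zero, List.take_zero] at h
  simp only [PySem.Chars.len_eq]
  exact h

lemma pvBinv (rest : List Char) : ∀ (pending : List Char) (tokens : List (List Char))
    (buf : List Char) (acc : List (List String)),
    pvSplit [] pending = tokens ++ [buf] →
    (rest.foldl pvStepB ⟨acc, tokens, buf, pvLastIsOf tokens⟩).entitys = pvRunA pending rest acc := by
  induction rest with
  | nil => intro pending tokens buf acc _; simp [pvRunA]
  | cons c t ih =>
    intro pending tokens buf acc hinv
    rw [List.foldl_cons]
    by_cases hdot : c = '.'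
    · subst hdot
      rw [show pvRunA pending ('.' :: t) acc
            = if pvSubCond (pvSplit [] pending)
              then pvRunA [] t (acc ++ [pvEntity (pvSplit [] pending)])
              else pvRunA (pending ++ ['.']) t acc from by simp [pvRunA]]
      rw [hinv, pvCond_eq]
      by_cases hb : buf = ['i','s']
      · -- condition false; buf gets the dot
        rw [if_neg (by simp [hb])]
        have hstep : pvStepB ⟨acc, tokens, buf, pvLastIsOf tokens⟩ '.'
            = ⟨acc, tokens, buf ++ ['.'], pvLastIsOf tokens⟩ := by
          unfold pvStepB
          cases h : pvLastIsOf tokens <;> simp [hb]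
        rw [hstep]
        exact ih (pending ++ ['.']) tokens (buf ++ ['.']) acc
          (pvSplit_snoc pending [] '.' (by decide) tokens buf hinv)
      · cases hL : pvLastIsOf tokens with
        | none =>
          rw [if_neg (by simp)]
          have hstep : pvStepB ⟨acc, tokens, buf, none⟩ '.'
              = ⟨acc, tokens, buf ++ ['.'], none⟩ := by
            unfold pvStepB; simp
          rw [hstep]
          have := ih (pending ++ ['.']) tokens (buf ++ ['.']) acc
            (pvSplit_snoc pending [] '.' (by decide) tokens buf hinv)
          rw [hL] at this
          exact this
        | some v =>
          rw [if_pos (by simp [hb])]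
          obtain ⟨k, hk, rfl⟩ : ∃ k, (pvAllIs tokens).getLast? = some k ∧ v = (k : Int) := by
            unfold pvLastIsOf at hL
            cases h : (pvAllIs tokens).getLast? with
            | none => rw [h] at hL; simp at hL
            | some k => rw [h] at hL; simp at hL; exact ⟨k, rfl, hL.symm⟩
          have hstep : pvStepB ⟨acc, tokens, buf, some (k : Int)⟩ '.'
              = ⟨acc ++ [[String.ofList (PySem.Chars.strip (PySem.Chars.join [' '] (PySem.List.slice tokens none (some (k : Int))))),
                          String.ofList (PySem.Chars.strip (PySem.Chars.join [' '] (PySem.List.slice tokens (some ((k : Int) + 1)) none ++ [buf])))]],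
                 [], [], none⟩ := by
            unfold pvStepB; simp [hb]
          rw [hstep, pvEntity_eq tokens buf k hb hk]
          have := ih [] [] [] (acc ++ [[String.ofList (PySem.Chars.strip (PySem.Chars.join [' '] (PySem.List.slice tokens none (some (k : Int))))),
                          String.ofList (PySem.Chars.strip (PySem.Chars.join [' '] (PySem.List.slice tokens (some ((k : Int) + 1)) none ++ [buf])))]]) (by simp [pvSplit])
          rw [show pvLastIsOf [] = none from rfl] at this
          exact this
    · by_cases hsp : c = ' '
      · subst hsp
        have hstep : pvStepB ⟨acc, tokens, buf, pvLastIsOf tokens⟩ ' '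
            = ⟨acc, tokens ++ [buf], [], pvLastIsOf (tokens ++ [buf])⟩ := by
          unfold pvStepB
          simp only [if_neg (by decide : ¬(' ' = '.'))]
          unfold pvLastIsOf
          rw [pvAllIs_snoc]
          by_cases hb : buf = ['i','s']
          · simp [hb]
          · simp [hb]
        rw [hstep]
        rw [show pvRunA pending (' ' :: t) acc = pvRunA (pending ++ [' ']) t acc from by simp [pvRunA]]
        exact ih (pending ++ [' ']) (tokens ++ [buf]) [] acc
          (by rw [pvSplit_snoc_space, hinv, List.append_assoc])
      · have hstep : pvStepB ⟨acc, tokens, buf, pvLastIsOf tokens⟩ c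
            = ⟨acc, tokens, buf ++ [c], pvLastIsOf tokens⟩ := by
          unfold pvStepB; simp [hdot, hsp]
        rw [hstep]
        rw [show pvRunA pending (c :: t) acc = pvRunA (pending ++ [c]) t acc from by simp [pvRunA, hdot]]
        exact ih (pending ++ [c]) tokens (buf ++ [c]) acc
          (pvSplit_snoc pending [] c hsp tokens buf hinv)

lemma pvB_eq (text : String) : text2entity_alt text = pvRunA [] text.toList [] := by
  unfold text2entity_alt
  have := pvBinv text.toList [] [] [] [] (by simp [pvSplit])
  rw [show pvLastIsOf [] = none from rfl] at this
  exact this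

-- ===== VERDICT (by name: the statement is the Claim_ definition above) =====
theorem text2entity_spec : Claim_equal_text2entity := by
  intro text _
  unfold Spec_text2entity
  rw [pvA_eq, pvB_eq]
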